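-- pv_equiv track=rewrite | github.com/pypi-data/pypi-mirror-389 | packages/mesomath/mesomath-1.1.1.tar.gz/mesomath-1.1.1/mesomath/mesolib.py | dec2sex
-- ===== SOURCE A (Python) =====
-- def dec2list(n):
--     """Convert integer decimal n to list of int's (sexagesimal digits)"""
--     if n < 60:
--         return [n]
--     else:
--         rlist = []
--         while n >= 60:
--             rlist.append(n % 60)
--             n = n // 60
--         if n > 0:
--             rlist.append(n)
--         rlist.reverse()
--     return rlist
--
-- def dec2sex(n, fill=False, sep=":"):
--     """Convert decimal n to sexagesimal
--
--     :fill: pad with left 0 sexagesimal digits <= 9 (default: False)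
--     :sep: sexagesimal digit separator (default: ":")
--
--     """
--     if n < 60:
--         return f"{n:02d}"
--     else:
--         rlist = dec2list(n)
--         if fill:
--             tt = list(map(str, rlist))
--             for i in range(len(tt)):
--                 if len(tt[i]) == 1:
--                     tt[i] = "0" + tt[i]
--             return sep.join(tt)
--         else:
--             return sep.join(map(str, rlist))
-- ===== SOURCE B (Python) =====
-- def dec2sex(n, fill=False, sep=":"):
--     """Convert decimal n to sexagesimal (MSB-first direct digit extraction)."""
--     if n < 60:
--         return f"{n:02d}"
--     p = 1
--     while p * 60 <= n:
--         p *= 60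
--     parts = []
--     while p >= 1:
--         d = n // p
--         n %= p
--         parts.append("0" + str(d) if fill and d < 10 else str(d))
--         p //= 60
--     return sep.join(parts)
-- ===== Notes on version B (the rewrite author's own statement) =====
-- stated objective: alternative
-- what changed: B finds the largest power 60^k <= n and extracts digits most-significant-first by division/remainder, padding each digit as it is emitted, instead of A's collect-remainders-then-reverse list plus a separate index loop that re-pads the stringified digits.
import Mathlib
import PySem

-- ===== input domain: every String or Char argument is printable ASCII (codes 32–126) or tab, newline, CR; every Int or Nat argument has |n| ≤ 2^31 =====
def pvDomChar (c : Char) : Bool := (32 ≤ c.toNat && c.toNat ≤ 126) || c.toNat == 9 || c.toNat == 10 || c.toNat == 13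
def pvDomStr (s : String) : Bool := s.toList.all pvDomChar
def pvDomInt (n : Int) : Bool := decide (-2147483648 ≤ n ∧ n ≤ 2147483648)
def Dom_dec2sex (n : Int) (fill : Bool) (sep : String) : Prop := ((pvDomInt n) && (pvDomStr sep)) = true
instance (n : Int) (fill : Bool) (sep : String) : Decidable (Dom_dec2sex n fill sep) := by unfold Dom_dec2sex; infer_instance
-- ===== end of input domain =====

-- B extracts the sexagesimal digits most-significant-first via the largest power 60^k ≤ n,
-- padding each digit as it is emitted, instead of A's remainder-collect-and-reverse plus a
-- separate index loop re-padding the stringified digits (objective: alternative, same cost).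

-- exact port of f"{x:02d}" for every int: zero-pad to width 2, sign stays in front
def pvFmt02 (x : Int) : String := PySem.Str.zfill (PySem.Int.toStr x) 2

-- ===== PORT A =====
def dec2listAux (n : Int) (rlist : List Int) : List Int :=
  if 60 ≤ n then
    dec2listAux (PySem.Int.floordiv n 60) (rlist ++ [PySem.Int.mod n 60])
  else
    (if 0 < n then rlist ++ [n] else rlist).reverse
termination_by n.toNat
decreasing_by
  rename_i h
  rw [PySem.Int.floordiv_eq_ediv_of_pos (by norm_num)]
  omega

def dec2list (n : Int) : List Int :=
  if n < 60 then [n] else dec2listAux n []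

def dec2sex (n : Int) (fill : Bool) (sep : String) : String :=
  if n < 60 then pvFmt02 n
  else
    let rlist := dec2list n
    if fill then
      let tt := rlist.map PySem.Int.toStr
      let tt2 := (PySem.List.pyRange 0 (tt.length) 1).foldl
        (fun t i =>
          if PySem.Str.len (PySem.List.pyGetD t i "") == 1 then
            t.set i.toNat ("0" ++ PySem.List.pyGetD t i "")
          else t) tt
      PySem.Str.join sep tt2
    else
      PySem.Str.join sep (rlist.map PySem.Int.toStr)

-- ===== PORT B =====
def findP (n p : Int) : Int :=
  -- '1 ≤ p' is a termination guard only: the loop is entered with p = 1 and p only grows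
  if 1 ≤ p ∧ p * 60 ≤ n then findP n (p * 60) else p
termination_by (n - p).toNat
decreasing_by
  rename_i h
  omega

def digAux (fill : Bool) (n p : Int) (parts : List String) : List String :=
  if 1 ≤ p then
    digAux fill (PySem.Int.mod n p) (PySem.Int.floordiv p 60)
      (parts ++ [if fill && decide (PySem.Int.floordiv n p < 10) then
                   "0" ++ PySem.Int.toStr (PySem.Int.floordiv n p)
                 else PySem.Int.toStr (PySem.Int.floordiv n p)])
  else parts
termination_by p.toNat
decreasing_by
  rename_i h
  rw [PySem.Int.floordiv_eq_ediv_of_pos (by norm_num)]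
  omega

def dec2sex_alt (n : Int) (fill : Bool) (sep : String) : String :=
  if n < 60 then pvFmt02 n
  else PySem.Str.join sep (digAux fill n (findP n 1) [])

-- ===== PRECONDITION & SPEC =====
def Spec_dec2sex (n : Int) (fill : Bool) (sep : String) (out : String) : Prop := out = dec2sex_alt n fill sep
instance (n : Int) (fill : Bool) (sep : String) (out : String) : Decidable (Spec_dec2sex n fill sep out) := by unfold Spec_dec2sex; infer_instance

-- ===== CLAIM (what is proved, stated in full; the proofs are below) =====
def Claim_equal_dec2sex : Prop := ∀ (n : Int) (fill : Bool) (sep : String), Dom_dec2sex n fill sep → Spec_dec2sex n fill sep (dec2sex n fill sep)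

-- ===== LEMMAS AND PROOFS =====

-- LSB-first digit list of m (dropping a zero final quotient), mirroring A's while loop
def lsbN (n : Nat) : List Nat :=
  if 60 ≤ n then n % 60 :: lsbN (n / 60)
  else if 0 < n then [n] else []
termination_by n
decreasing_by omega

-- the k+1 base-60 digits of n (for n < 60^(k+1)), MSB first, mirroring B's loop
def msbK : Nat → Nat → List Nat
  | 0, n => [n]
  | k+1, n => n / 60^(k+1) :: msbK k (n % 60^(k+1))

-- the string B emits for digit d
def render (fill : Bool) (d : Nat) : String :=
  if fill && decide ((d : Int) < 10) then "0" ++ PySem.Int.toStr (d : Int) else PySem.Int.toStr (d : Int)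

lemma msbK_snoc (k : Nat) : ∀ n, msbK (k+1) n = msbK k (n / 60) ++ [n % 60] := by
  induction k with
  | zero => intro n; simp [msbK]
  | succ k ih =>
    intro n
    have h1 : n % 60^(k+2) % 60 = n % 60 := Nat.mod_mod_of_dvd n (dvd_pow_self 60 (by omega))
    have h2 : n % 60^(k+2) / 60 = n / 60 % 60^(k+1) := by
      have : (60:Nat)^(k+2) = 60 * 60^(k+1) := by ring
      rw [this, Nat.mod_mul_right_div_self]
    have h3 : n / 60^(k+2) = n / 60 / 60^(k+1) := by
      rw [Nat.div_div_eq_div_mul]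
      congr 1
      ring
    conv_lhs => rw [msbK]
    rw [ih, h1, h2]
    conv_rhs => rw [msbK]
    rw [h3]
    simp

lemma msbK_lt (k : Nat) : ∀ m : Nat, m < 60^(k+1) → ∀ d ∈ msbK k m, d < 60 := by
  induction k with
  | zero => intro m hm d hd; simp [msbK] at hd; omega
  | succ k ih =>
    intro m hm d hd
    simp only [msbK, List.mem_cons] at hd
    rcases hd with h | h
    · have : m / 60^(k+1) < 60 := by
        apply Nat.div_lt_of_lt_mul
        calc m < 60^(k+2) := hm
        _ = 60^(k+1) * 60 := by ring
      omega
    · exact ih _ (Nat.mod_lt _ (by positivity)) _ h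

lemma len_toStr_digit (d : Nat) (hd : d < 60) :
    (PySem.Str.len (PySem.Int.toStr (d : Int)) == 1) = decide ((d : Int) < 10) := by
  interval_cases d <;> decide

lemma dec2listAux_eq (m : Nat) : ∀ acc : List Int,
    dec2listAux (m : Int) acc = (acc ++ (lsbN m).map (fun d : Nat => (d : Int))).reverse := by
  induction m using Nat.strong_induction_on with
  | _ m ih =>
    intro acc
    rw [dec2listAux, lsbN]
    by_cases h : 60 ≤ m
    · rw [if_pos (by exact_mod_cast h), if_pos h]
      rw [show PySem.Int.floordiv (m : Int) 60 = ((m / 60 : Nat) : Int) by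
            exact_mod_cast PySem.Int.floordiv_natCast m 60,
          show PySem.Int.mod (m : Int) 60 = ((m % 60 : Nat) : Int) by
            exact_mod_cast PySem.Int.mod_natCast m 60]
      rw [ih (m / 60) (by omega)]
      simp
    · rw [if_neg (by exact_mod_cast h), if_neg h]
      by_cases h0 : 0 < m
      · rw [if_pos (by exact_mod_cast h0), if_pos h0]
        simp
      · rw [if_neg (by exact_mod_cast h0), if_neg h0]
        simp

lemma msbK_eq_rev_lsbN (k : Nat) : ∀ m : Nat, 60^k ≤ m → m < 60^(k+1) →
    msbK k m = (lsbN m).reverse := by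
  induction k with
  | zero =>
    intro m h1 h2
    rw [lsbN, if_neg (by simpa using h2), if_pos (by simpa using h1)]
    rfl
  | succ k ih =>
    intro m h1 h2
    have h60 : 60 ≤ m := le_trans (by calc (60:Nat) = 60^1 := (pow_one 60).symm
                                         _ ≤ 60^(k+1) := Nat.pow_le_pow_right (by omega) (by omega)) h1
    rw [msbK_snoc, lsbN, if_pos h60, List.reverse_cons]
    congr 1
    apply ih
    · rw [Nat.le_div_iff_mul_le (by omega)]
      calc 60^k * 60 = 60^(k+1) := by ring
      _ ≤ m := h1
    · rw [Nat.div_lt_iff_lt_mul (by omega)]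
      calc m < 60^(k+2) := h2
      _ = 60^(k+1) * 60 := by ring

lemma findP_aux (m : Nat) : ∀ (t j : Nat), m - 60^j ≤ t → 60^j ≤ m →
    ∃ k, findP (m : Int) (((60:Nat)^j : Nat) : Int) = (((60:Nat)^k : Nat) : Int) ∧ 60^k ≤ m ∧ m < 60^(k+1) := by
  intro t
  induction t with
  | zero =>
    intro j h0 hj
    have hlt : m < 60^(j+1) := by
      have : 60^j < 60^(j+1) := Nat.pow_lt_pow_right (by omega) (by omega)
      omega
    rw [findP]
    rw [if_neg (by
      rintro ⟨-, hc⟩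
      have : 60^(j+1) ≤ m := by
        have h1 : (((60:Nat)^(j+1) : Nat) : Int) ≤ (m : Int) := by
          calc (((60:Nat)^(j+1) : Nat) : Int) = (((60:Nat)^j : Nat) : Int) * 60 := by push_cast; ring
          _ ≤ (m : Int) := hc
        exact_mod_cast h1
      omega)]
    exact ⟨j, rfl, hj, hlt⟩
  | succ t ih =>
    intro j h0 hj
    rw [findP]
    by_cases h : 60^(j+1) ≤ m
    · have hcond : (1:Int) ≤ (((60:Nat)^j : Nat) : Int) ∧ (((60:Nat)^j : Nat) : Int) * 60 ≤ (m : Int) := by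
        constructor
        · exact_mod_cast Nat.one_le_pow j 60 (by omega)
        · have hb : (60:Nat)^j * 60 ≤ m := by
            calc (60:Nat)^j * 60 = 60^(j+1) := by ring
            _ ≤ m := h
          exact_mod_cast hb
      rw [if_pos hcond]
      have hrw : (((60:Nat)^j : Nat) : Int) * 60 = (((60:Nat)^(j+1) : Nat) : Int) := by push_cast; ring
      rw [hrw]
      apply ih (j+1) _ h
      have : 60^j < 60^(j+1) := Nat.pow_lt_pow_right (by omega) (by omega)
      omega
    · rw [if_neg (by
        rintro ⟨-, hc⟩
        apply h
        have h1 : (((60:Nat)^(j+1) : Nat) : Int) ≤ (m : Int) := by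
          calc (((60:Nat)^(j+1) : Nat) : Int) = (((60:Nat)^j : Nat) : Int) * 60 := by push_cast; ring
          _ ≤ (m : Int) := hc
        exact_mod_cast h1)]
      exact ⟨j, rfl, hj, by omega⟩

lemma digAux_spec (fill : Bool) (k : Nat) : ∀ (m : Nat) (parts : List String), m < 60^(k+1) →
    digAux fill (m : Int) (((60:Nat)^k : Nat) : Int) parts = parts ++ (msbK k m).map (render fill) := by
  induction k with
  | zero =>
    intro m parts hm
    have e1 : PySem.Int.floordiv (m : Int) (((60:Nat)^0 : Nat) : Int) = (m : Int) := by
      rw [show (((60:Nat)^0 : Nat) : Int) = ((1:Nat) : Int) by norm_num]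
      rw [PySem.Int.floordiv_natCast]
      norm_num
    have e2 : PySem.Int.mod (m : Int) (((60:Nat)^0 : Nat) : Int) = ((0:Nat) : Int) := by
      rw [show (((60:Nat)^0 : Nat) : Int) = ((1:Nat) : Int) by norm_num]
      rw [PySem.Int.mod_natCast]
      norm_num
    have e3 : PySem.Int.floordiv (((60:Nat)^0 : Nat) : Int) 60 = ((0:Nat) : Int) := by
      rw [show (((60:Nat)^0 : Nat) : Int) = ((1:Nat) : Int) by norm_num,
          show (60:Int) = ((60:Nat) : Int) from rfl]
      rw [PySem.Int.floordiv_natCast]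
    rw [digAux, if_pos (by exact_mod_cast Nat.one_le_pow 0 60 (by omega)), e1, e2, e3]
    rw [digAux, if_neg (by norm_num)]
    simp [msbK, render]
  | succ k ih =>
    intro m parts hm
    rw [digAux, if_pos (by exact_mod_cast Nat.one_le_pow (k+1) 60 (by omega))]
    rw [show PySem.Int.floordiv (((60:Nat)^(k+1) : Nat) : Int) 60 = (((60:Nat)^k : Nat) : Int) by
      rw [show (60 : Int) = ((60 : Nat) : Int) from rfl, PySem.Int.floordiv_natCast]
      congr 1
      rw [pow_succ, Nat.mul_div_cancel _ (by omega)]]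
    rw [show PySem.Int.mod (m : Int) (((60:Nat)^(k+1) : Nat) : Int) = ((m % 60^(k+1) : Nat) : Int) by
      exact_mod_cast PySem.Int.mod_natCast m (60^(k+1))]
    rw [show PySem.Int.floordiv (m : Int) (((60:Nat)^(k+1) : Nat) : Int) = ((m / 60^(k+1) : Nat) : Int) by
      exact_mod_cast PySem.Int.floordiv_natCast m (60^(k+1))]
    rw [ih _ _ (Nat.mod_lt _ (by positivity))]
    simp [msbK, render]

lemma pad_loop_aux {α : Type} (P : α → Bool) (g : α → α) (dflt : α) :
    ∀ (b a : List α),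
    ((List.range b.length).map (fun i => ((a.length + i : Nat) : Int))).foldl
      (fun t i => if P (PySem.List.pyGetD t i dflt) then t.set i.toNat (g (PySem.List.pyGetD t i dflt)) else t) (a ++ b)
    = a ++ b.map (fun x => if P x then g x else x) := by
  intro b
  induction b with
  | nil => simp
  | cons x bs ih =>
    intro a
    rw [List.length_cons, List.range_succ_eq_map]
    simp only [List.map_cons, List.map_map, List.foldl_cons]
    have hget : PySem.List.pyGetD (a ++ x :: bs) ((a.length + 0 : Nat) : Int) dflt = x := by
      rw [PySem.List.pyGetD_natCast]
      simp [List.getD_eq_getElem?_getD]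
    have hset : (a ++ x :: bs).set ((a.length + 0 : Nat) : Int).toNat (g x) = a ++ g x :: bs := by
      rw [Int.toNat_natCast, Nat.add_zero, List.set_append]
      simp
    have hstate : (if P (PySem.List.pyGetD (a ++ x :: bs) ((a.length + 0 : Nat) : Int) dflt) then
        (a ++ x :: bs).set ((a.length + 0 : Nat) : Int).toNat
          (g (PySem.List.pyGetD (a ++ x :: bs) ((a.length + 0 : Nat) : Int) dflt))
        else (a ++ x :: bs)) = a ++ (if P x then g x else x) :: bs := by
      rw [hget, hset]
      by_cases h : P x <;> simp [h]
    rw [hstate]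
    have hfun : (fun i : Nat => ((a.length + (i + 1) : Nat) : Int))
        = (fun i : Nat => (((a ++ [if P x then g x else x]).length + i : Nat) : Int)) := by
      funext i
      simp
      omega
    calc ((List.range bs.length).map fun i => ((a.length + (i+1) : Nat) : Int)).foldl
          (fun t i => if P (PySem.List.pyGetD t i dflt) then t.set i.toNat (g (PySem.List.pyGetD t i dflt)) else t)
          (a ++ (if P x then g x else x) :: bs)
        = ((List.range bs.length).map fun i => (((a ++ [if P x then g x else x]).length + i : Nat) : Int)).foldl
          (fun t i => if P (PySem.List.pyGetD t i dflt) then t.set i.toNat (g (PySem.List.pyGetD t i dflt)) else t)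
          ((a ++ [if P x then g x else x]) ++ bs) := by
          rw [hfun]
          congr 1
          simp
      _ = (a ++ [if P x then g x else x]) ++ bs.map (fun x => if P x then g x else x) := ih _
      _ = a ++ (x :: bs).map (fun x => if P x then g x else x) := by simp

lemma pad_loop_eq_map {α : Type} (P : α → Bool) (g : α → α) (dflt : α) (tt : List α) :
    (PySem.List.pyRange 0 (tt.length) 1).foldl
      (fun t i => if P (PySem.List.pyGetD t i dflt) then t.set i.toNat (g (PySem.List.pyGetD t i dflt)) else t) tt
    = tt.map (fun x => if P x then g x else x) := by
  have h := pad_loop_aux P g dflt tt []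
  simpa [PySem.List.pyRange_zero_natCast] using h

-- ===== VERDICT (by name: the statement is the Claim_ definition above) =====
theorem dec2sex_spec : Claim_equal_dec2sex := by
  intro n fill sep _
  unfold Spec_dec2sex
  by_cases h : n < 60
  · simp [dec2sex, dec2sex_alt, h]
  · have hn0 : (0:Int) ≤ n := by omega
    have hm : ((n.toNat : Nat) : Int) = n := Int.toNat_of_nonneg hn0
    set m := n.toNat with hmdef
    have hm60 : 60 ≤ m := by omega
    obtain ⟨k, hfp, hk1, hk2⟩ := findP_aux m (m - 60^0) 0 (le_refl _) (by simpa using by omega)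
    have hdigits : dec2list n = (msbK k m).map (fun d : Nat => (d : Int)) := by
      rw [dec2list, if_neg h, ← hm, dec2listAux_eq m []]
      rw [msbK_eq_rev_lsbN k m hk1 hk2]
      simp
    have hone : ((((60:Nat)^0 : Nat)) : Int) = 1 := by norm_num
    have hB : dec2sex_alt n fill sep
        = PySem.Str.join sep ((msbK k m).map (render fill)) := by
      rw [dec2sex_alt, if_neg h, ← hm, ← hone, hfp, digAux_spec fill k m [] hk2]
      simp
    rw [hB, dec2sex, if_neg h]
    simp only [hdigits]
    rcases fill with _ | _
    · rw [if_neg (by simp), List.map_map]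
      refine congrArg (PySem.Str.join sep) (List.map_congr_left ?_)
      intro d _
      simp [render, Function.comp]
    · rw [if_pos (by simp),
          pad_loop_eq_map (fun s => PySem.Str.len s == 1) (fun s => "0" ++ s) "",
          List.map_map, List.map_map]
      refine congrArg (PySem.Str.join sep) (List.map_congr_left ?_)
      intro d hd
      have hlt : d < 60 := msbK_lt k m hk2 d hd
      simp only [Function.comp]
      rw [len_toStr_digit d hlt]
      simp [render]
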